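-- pv_equiv track=rewrite | github.com/kuang-da/CellType-Refinery | celltype_refinery/core/composition/viz/dashboard.py | _get_region_colors
-- ===== SOURCE A (Python) =====
-- from typing import Dict, List, Optional, Union
--
-- DEFAULT_REGION_COLORS = [
--     "#3498db",  # blue
--     "#e74c3c",  # red
--     "#2ecc71",  # green
--     "#9b59b6",  # purple
--     "#f39c12",  # orange
--     "#1abc9c",  # teal
--     "#e67e22",  # dark orange
--     "#34495e",  # dark blue-gray
--     "#95a5a6",  # gray
--     "#d35400",  # burnt orange
-- ]
--
-- def _get_region_colors(regions: List[str], config_colors: Optional[Dict[str, str]] = None) -> Dict[str, str]: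
--     """Get color mapping for regions."""
--     colors = {}
--
--     # Use config colors if provided
--     if config_colors:
--         for region in regions:
--             r_lower = region.lower()
--             if r_lower in config_colors:
--                 colors[region] = config_colors[r_lower]
--             elif region in config_colors:
--                 colors[region] = config_colors[region]
--
--     # Fill in missing regions with default colors
--     color_idx = 0
--     for region in regions:
--         if region not in colors:
--             colors[region] = DEFAULT_REGION_COLORS[color_idx % len(DEFAULT_REGION_COLORS)]
--             color_idx += 1
--
--     return colors
-- ===== SOURCE B (Python) =====
-- DEFAULT_REGION_COLORS = [
--     "#3498db",
--     "#e74c3c",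
--     "#2ecc71",
--     "#9b59b6",
--     "#f39c12",
--     "#1abc9c",
--     "#e67e22",
--     "#34495e",
--     "#95a5a6",
--     "#d35400",
-- ]
--
--
-- def _get_region_colors(regions, config_colors=None):
--     """One pass over regions: partition into config-matched and default-colored
--     pairs (skipping repeats via a seen-set), then merge the two runs."""
--     found = []
--     defaults = []
--     seen = set()
--     idx = 0
--     for region in regions:
--         if region in seen:
--             continue
--         seen.add(region)
--         color = None
--         if config_colors:
--             color = config_colors.get(region.lower())
--             if color is None:
--                 color = config_colors.get(region)
--         if color is not None:
--             found.append((region, color))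
--         else:
--             defaults.append((region, DEFAULT_REGION_COLORS[idx % len(DEFAULT_REGION_COLORS)]))
--             idx += 1
--     return dict(found + defaults)
-- ===== Notes on version B (the rewrite author's own statement) =====
-- stated objective: alternative
-- what changed: B replaces A's two sequential passes over regions (a config-lookup pass building the dict, then a default-fill pass re-scanning it) by a single pass that dedups with an explicit seen-set and partitions each new region into a config-matched or a default-colored run, merging the two runs into the result dict at the end.
import Mathlib
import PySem

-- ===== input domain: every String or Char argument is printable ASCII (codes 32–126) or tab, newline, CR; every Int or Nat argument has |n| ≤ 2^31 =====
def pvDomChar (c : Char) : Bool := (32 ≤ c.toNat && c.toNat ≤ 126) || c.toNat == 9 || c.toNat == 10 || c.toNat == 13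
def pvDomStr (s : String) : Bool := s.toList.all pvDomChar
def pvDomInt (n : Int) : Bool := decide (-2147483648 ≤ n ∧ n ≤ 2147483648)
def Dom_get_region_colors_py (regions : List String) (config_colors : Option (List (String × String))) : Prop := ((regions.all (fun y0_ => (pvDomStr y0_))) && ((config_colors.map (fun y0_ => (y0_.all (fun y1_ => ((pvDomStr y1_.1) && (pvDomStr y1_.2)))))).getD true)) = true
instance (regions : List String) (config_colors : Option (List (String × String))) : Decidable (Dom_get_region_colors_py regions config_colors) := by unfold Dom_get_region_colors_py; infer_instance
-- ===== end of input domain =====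

-- B replaces A's two full passes over `regions` by a single pass that partitions the
-- regions into config-matched and default-colored pairs and merges the two runs
-- (objective: alternative decomposition; same result, including insertion order).

def DEFAULT_REGION_COLORS : List String :=
  ["#3498db", "#e74c3c", "#2ecc71", "#9b59b6", "#f39c12",
   "#1abc9c", "#e67e22", "#34495e", "#95a5a6", "#d35400"]

-- ===== PORT A =====
def get_region_colors_py (regions : List String) (config_colors : Option (List (String × String))) : List (String × String) :=
  let colors1 : PySem.Dict String String :=
    match config_colors with
    | none => PySem.Dict.empty
    | some cc =>
      let d := PySem.Dict.ofList cc
      if d.items = [] then PySem.Dict.empty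
      else
        regions.foldl (fun colors region =>
          match d.get? (PySem.Str.lower region) with
          | some v => colors.insert region v
          | none =>
            match d.get? region with
            | some v => colors.insert region v
            | none => colors) PySem.Dict.empty
  let final := regions.foldl (fun (st : PySem.Dict String String × Nat) region =>
      match st with
      | (colors, idx) =>
        if colors.contains region then (colors, idx)
        else (colors.insert region (DEFAULT_REGION_COLORS.getD (idx % DEFAULT_REGION_COLORS.length) ""), idx + 1))
    (colors1, 0)
  final.1.items

-- ===== PORT B =====
def get_region_colors_py_alt (regions : List String) (config_colors : Option (List (String × String))) : List (String × String) :=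
  let final := regions.foldl (fun (st : List (String × String) × List (String × String) × PySem.Set String × Nat) region =>
      match st with
      | (found, defaults, seen, idx) =>
        if PySem.Set.contains seen region then (found, defaults, seen, idx)
        else
          let seen' := PySem.Set.add seen region
          let color : Option String :=
            match config_colors with
            | none => none
            | some cc =>
              let d := PySem.Dict.ofList cc
              if d.items = [] then none
              else
                match d.get? (PySem.Str.lower region) with
                | some v => some v
                | none => d.get? region
          match color with
          | some v => (found ++ [(region, v)], defaults, seen', idx)
          | none => (found, defaults ++ [(region, DEFAULT_REGION_COLORS.getD (idx % DEFAULT_REGION_COLORS.length) "")], seen', idx + 1))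
    ([], [], [], 0)
  (PySem.Dict.ofList (final.1 ++ final.2.1)).items

-- ===== PRECONDITION & SPEC =====
def Spec_get_region_colors_py (regions : List String) (config_colors : Option (List (String × String))) (out : List (String × String)) : Prop := out = get_region_colors_py_alt regions config_colors
instance (regions : List String) (config_colors : Option (List (String × String))) (out : List (String × String)) : Decidable (Spec_get_region_colors_py regions config_colors out) := by unfold Spec_get_region_colors_py; infer_instance

-- ===== CLAIM (what is proved, stated in full; the proofs are below) =====
def Claim_equal_get_region_colors_py : Prop := ∀ (regions : List String) (config_colors : Option (List (String × String))), Dom_get_region_colors_py regions config_colors → Spec_get_region_colors_py regions config_colors (get_region_colors_py regions config_colors)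

-- ===== LEMMAS AND PROOFS =====

-- the effective config lookup both programs perform per region (lower key first, then exact key)
def hitF (config_colors : Option (List (String × String))) : String → Option String :=
  match config_colors with
  | none => fun _ => none
  | some cc =>
    let d := PySem.Dict.ofList cc
    if d.items = [] then fun _ => none
    else fun r =>
      match d.get? (PySem.Str.lower r) with
      | some v => some v
      | none => d.get? r

-- config-matched pairs, first occurrences in order
def cfgL (h : String → Option String) : List String → List String → List (String × String)
  | [], _ => []
  | r :: rs, seen =>
    if seen.contains r then cfgL h rs seen
    else
      match h r with
      | some v => (r, v) :: cfgL h rs (PySem.Set.add seen r)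
      | none => cfgL h rs (PySem.Set.add seen r)

-- default-colored pairs, first occurrences in order, cycling through the palette
def defL (h : String → Option String) : List String → List String → Nat → List (String × String)
  | [], _, _ => []
  | r :: rs, seen, idx =>
    if seen.contains r then defL h rs seen idx
    else
      match h r with
      | some _ => defL h rs (PySem.Set.add seen r) idx
      | none =>
        (r, DEFAULT_REGION_COLORS.getD (idx % DEFAULT_REGION_COLORS.length) "") ::
          defL h rs (PySem.Set.add seen r) (idx + 1)

lemma cfgL_none : ∀ (regions seen : List String), cfgL (fun _ => none) regions seen = [] := by
  intro regions
  induction regions with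
  | nil => intro seen; rfl
  | cons r rs ih =>
    intro seen
    simp only [cfgL]
    split <;> apply ih

lemma insert_self_of_get? (d : PySem.Dict String String) (k v : String)
    (hnd : d.keys.Nodup) (hg : d.get? k = some v) : d.insert k v = d := by
  apply PySem.Dict.ext
  rw [PySem.Dict.items_insert_of_contains _ v (by rw [PySem.Dict.contains_eq_isSome_get?, hg]; rfl)]
  conv_rhs => rw [← List.map_id d.items]
  apply List.map_congr_left
  intro p hp
  obtain ⟨a, b⟩ := p
  by_cases hk : a = k
  · subst hk
    have h2 := PySem.Dict.get?_of_mem_items d hp hnd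
    rw [hg] at h2
    injection h2 with hv
    simp [hv]
  · simp [hk]

lemma A1 (h : String → Option String) :
    ∀ (regions : List String) (colors : PySem.Dict String String) (seen : List String),
    colors.keys.Nodup →
    (∀ k, colors.get? k = if seen.contains k then h k else none) →
    (regions.foldl (fun colors r =>
        match h r with
        | some v => colors.insert r v
        | none => colors) colors).items = colors.items ++ cfgL h regions seen ∧
    ∀ k, (regions.foldl (fun colors r =>
        match h r with
        | some v => colors.insert r v
        | none => colors) colors).get? k =
      if seen.contains k || regions.contains k then h k else none := by
  intro regions
  induction regions with
  | nil =>
    intro colors seen hnd hg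
    refine ⟨by simp [cfgL], ?_⟩
    intro k
    simpa using hg k
  | cons r rs ih =>
    intro colors seen hnd hg
    simp only [List.foldl_cons, cfgL]
    by_cases hc : seen.contains r
    · simp only [hc, if_true]
      have hcond : ∀ k, (seen.contains k || rs.contains k) = (seen.contains k || (r :: rs).contains k) := by
        intro k
        by_cases hk : k = r
        · subst hk
          have hks : k ∈ seen := by simpa using hc
          simp [List.contains_cons, hks]
        · simp [List.contains_cons, hk]
      cases hh : h r with
      | some v =>
        have heq : colors.insert r v = colors :=
          insert_self_of_get? colors r v hnd (by rw [hg r, if_pos hc, hh])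
        simp only []
        rw [heq]
        obtain ⟨ih1, ih2⟩ := ih colors seen hnd hg
        exact ⟨ih1, fun k => by rw [ih2 k, hcond k]⟩
      | none =>
        simp only []
        obtain ⟨ih1, ih2⟩ := ih colors seen hnd hg
        exact ⟨ih1, fun k => by rw [ih2 k, hcond k]⟩
    · simp only [hc, if_false, Bool.false_eq_true]
      have hadd : PySem.Set.add seen r = seen ++ [r] := by
        simp only [PySem.Set.add, PySem.Set.contains]
        rw [if_neg]
        simpa using hc
      have hcond : ∀ k, (List.contains (PySem.Set.add seen r) k || rs.contains k)
          = (seen.contains k || (r :: rs).contains k) := by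
        intro k
        by_cases hk : k = r
        · subst hk; simp [hadd, List.contains_cons]
        · simp [hadd, hk]
      cases hh : h r with
      | some v =>
        have hcr : colors.contains r = false := by
          rw [PySem.Dict.contains_eq_isSome_get?, hg r, if_neg hc]
          rfl
        have hnd' : (colors.insert r v).keys.Nodup := PySem.Dict.nodup_keys_insert _ _ _ hnd
        have hg' : ∀ k, (colors.insert r v).get? k =
            if (PySem.Set.add seen r).contains k then h k else none := by
          intro k
          rw [PySem.Dict.get?_insert]
          by_cases hk : k = r
          · subst hk; simp [hadd, hh]
          · rw [if_neg hk, hg k]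
            simp [hadd, hk]
        obtain ⟨ih1, ih2⟩ := ih (colors.insert r v) (PySem.Set.add seen r) hnd' hg'
        simp only []
        refine ⟨?_, fun k => by rw [ih2 k, hcond k]⟩
        rw [ih1, PySem.Dict.items_insert_of_not_contains _ v hcr]
        simp
      | none =>
        have hg' : ∀ k, colors.get? k =
            if (PySem.Set.add seen r).contains k then h k else none := by
          intro k
          by_cases hk : k = r
          · rw [hk, hg r, if_neg hc, if_pos (by simp [hadd, PySem.Set.contains]), hh]
          · rw [hg k]
            simp [hadd, hk]
        obtain ⟨ih1, ih2⟩ := ih colors (PySem.Set.add seen r) hnd hg'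
        simp only []
        exact ⟨ih1, fun k => by rw [ih2 k, hcond k]⟩

lemma A2 (h : String → Option String) :
    ∀ (regions : List String) (colors : PySem.Dict String String) (seen : List String) (idx : Nat),
    (∀ r, regions.contains r → colors.contains r = ((h r).isSome || seen.contains r)) →
    ((regions.foldl (fun (st : PySem.Dict String String × Nat) r =>
        match st with
        | (colors, idx) =>
          if colors.contains r then (colors, idx)
          else (colors.insert r (DEFAULT_REGION_COLORS.getD (idx % DEFAULT_REGION_COLORS.length) ""), idx + 1))
      (colors, idx)).1).items = colors.items ++ defL h regions seen idx := by
  intro regions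
  induction regions with
  | nil => intro colors seen idx hc; simp [defL]
  | cons r rs ih =>
    intro colors seen idx hc
    simp only [List.foldl_cons, defL]
    have hcr := hc r (by simp [List.contains_cons])
    by_cases hs : seen.contains r
    · have hct : colors.contains r = true := by
        rw [hcr]; simp; exact Or.inr (by simpa using hs)
      simp only [hs, if_true, hct]
      exact ih colors seen idx (fun k hk => hc k (by simp [List.contains_cons]; exact Or.inr (by simpa using hk)))
    · simp only [hs, if_false, Bool.false_eq_true]
      have hadd : PySem.Set.add seen r = seen ++ [r] := by
        simp only [PySem.Set.add, PySem.Set.contains]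
        rw [if_neg]
        simpa using hs
      cases hh : h r with
      | some v =>
        have hct : colors.contains r = true := by rw [hcr, hh]; simp
        simp only [hct, if_true]
        apply ih colors (PySem.Set.add seen r) idx
        intro k hk
        rw [hc k (by simp [List.contains_cons]; exact Or.inr (by simpa using hk))]
        by_cases hk2 : k = r
        · rw [hk2, hh]
          simp [hadd, PySem.Set.contains]
        · simp [hadd, hk2]
      | none =>
        have hcf : colors.contains r = false := by rw [hcr, hh]; simpa using hs
        simp only [hcf, Bool.false_eq_true, if_false]
        have hc' : ∀ k, rs.contains k →
            (colors.insert r (DEFAULT_REGION_COLORS.getD (idx % DEFAULT_REGION_COLORS.length) "")).contains k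
            = ((h k).isSome || List.contains (PySem.Set.add seen r) k) := by
          intro k hk
          rw [PySem.Dict.contains_insert]
          by_cases hk2 : k = r
          · rw [hk2]
            simp [hadd]
          · rw [hc k (by simp [List.contains_cons]; exact Or.inr (by simpa using hk))]
            simp [hadd, hk2]
        have hrec := ih (colors.insert r (DEFAULT_REGION_COLORS.getD (idx % DEFAULT_REGION_COLORS.length) ""))
          (PySem.Set.add seen r) (idx + 1) hc'
        rw [hrec, PySem.Dict.items_insert_of_not_contains _ _ hcf]
        simp

lemma B_fold (h : String → Option String) :
    ∀ (regions : List String) (found defaults : List (String × String)) (seen : List String) (idx : Nat),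
    (regions.foldl (fun (st : List (String × String) × List (String × String) × PySem.Set String × Nat) r =>
        match st with
        | (found, defaults, seen, idx) =>
          if PySem.Set.contains seen r then (found, defaults, seen, idx)
          else
            match h r with
            | some v => (found ++ [(r, v)], defaults, PySem.Set.add seen r, idx)
            | none => (found, defaults ++ [(r, DEFAULT_REGION_COLORS.getD (idx % DEFAULT_REGION_COLORS.length) "")], PySem.Set.add seen r, idx + 1))
      (found, defaults, seen, idx)).1 = found ++ cfgL h regions seen ∧
    (regions.foldl (fun (st : List (String × String) × List (String × String) × PySem.Set String × Nat) r =>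
        match st with
        | (found, defaults, seen, idx) =>
          if PySem.Set.contains seen r then (found, defaults, seen, idx)
          else
            match h r with
            | some v => (found ++ [(r, v)], defaults, PySem.Set.add seen r, idx)
            | none => (found, defaults ++ [(r, DEFAULT_REGION_COLORS.getD (idx % DEFAULT_REGION_COLORS.length) "")], PySem.Set.add seen r, idx + 1))
      (found, defaults, seen, idx)).2.1 = defaults ++ defL h regions seen idx := by
  intro regions
  induction regions with
  | nil => intro found defaults seen idx; simp [cfgL, defL]
  | cons r rs ih =>
    intro found defaults seen idx
    simp only [List.foldl, cfgL, defL]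
    have hsc : PySem.Set.contains seen r = seen.contains r := rfl
    by_cases hc : seen.contains r
    · rw [hsc]
      simp only [hc, if_true]
      exact ih found defaults seen idx
    · rw [hsc]
      simp only [hc, if_false, Bool.false_eq_true]
      cases hh : h r with
      | some v =>
        obtain ⟨ih1, ih2⟩ := ih (found ++ [(r, v)]) defaults (PySem.Set.add seen r) idx
        constructor
        · rw [ih1]; simp
        · rw [ih2]
      | none =>
        obtain ⟨ih1, ih2⟩ := ih found
          (defaults ++ [(r, DEFAULT_REGION_COLORS.getD (idx % DEFAULT_REGION_COLORS.length) "")])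
          (PySem.Set.add seen r) (idx + 1)
        constructor
        · rw [ih1]
        · rw [ih2]; simp

lemma keys_nodup (h : String → Option String) :
    ∀ (regions seen : List String) (idx : Nat), seen.Nodup →
    (seen ++ (cfgL h regions seen).map Prod.fst ++ (defL h regions seen idx).map Prod.fst).Nodup := by
  intro regions
  induction regions with
  | nil => intro seen idx hs; simpa [cfgL, defL] using hs
  | cons r rs ih =>
    intro seen idx hs
    simp only [cfgL, defL]
    by_cases hc : seen.contains r
    · simp only [hc, if_true]
      exact ih seen idx hs
    · simp only [hc, if_false, Bool.false_eq_true]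
      have hrs : r ∉ seen := by simpa using hc
      have hadd : PySem.Set.add seen r = seen ++ [r] := by
        simp only [PySem.Set.add, PySem.Set.contains]
        rw [if_neg]
        simpa using hc
      have hs' : (PySem.Set.add seen r).Nodup := by
        rw [hadd]
        simp [List.nodup_append, hs, hrs]
        exact fun a ha har => hrs (har ▸ ha)
      cases hh : h r with
      | some v =>
        simpa [hadd, List.append_assoc] using ih (PySem.Set.add seen r) idx hs'
      | none =>
        have hrec := ih (PySem.Set.add seen r) (idx + 1) hs'
        have hperm :
            (PySem.Set.add seen r ++ (cfgL h rs (PySem.Set.add seen r)).map Prod.fst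
              ++ (defL h rs (PySem.Set.add seen r) (idx + 1)).map Prod.fst).Perm
            (seen ++ (cfgL h rs (PySem.Set.add seen r)).map Prod.fst
              ++ r :: (defL h rs (PySem.Set.add seen r) (idx + 1)).map Prod.fst) := by
          rw [hadd]
          simp only [List.append_assoc, List.cons_append, List.nil_append, List.singleton_append]
          exact (List.Perm.append_left seen List.perm_middle).symm
        simpa [List.append_assoc] using hperm.nodup hrec

lemma ofList_items_of_nodup (l : List (String × String)) (hnd : (l.map Prod.fst).Nodup) :
    (PySem.Dict.ofList l).items = l := by
  have : PySem.Dict.ofList l = l.foldl (fun d p => d.insert p.1 p.2) PySem.Dict.empty := rfl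
  rw [this]
  have := PySem.Dict.items_foldl_insert_fresh (ν := String) l Prod.fst Prod.snd PySem.Dict.empty
    (fun a _ => PySem.Dict.contains_empty _) hnd
  rw [show (fun (d : PySem.Dict String String) (p : String × String) => d.insert p.1 p.2) = (fun d a => d.insert (Prod.fst a) (Prod.snd a)) from rfl, this]
  simp
  rfl

lemma A_eq (regions : List String) (config_colors : Option (List (String × String))) :
    get_region_colors_py regions config_colors =
      cfgL (hitF config_colors) regions [] ++ defL (hitF config_colors) regions [] 0 := by
  unfold get_region_colors_py
  cases config_colors with
  | none =>
    simp only []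
    rw [show hitF (none : Option (List (String × String))) = (fun _ : String => none) from rfl]
    rw [A2 (fun _ => none) regions PySem.Dict.empty [] 0
      (fun r _ => by rw [PySem.Dict.contains_empty]; rfl)]
    rw [cfgL_none]
    simp [show (PySem.Dict.empty : PySem.Dict String String).items = [] from rfl]
  | some cc =>
    simp only []
    by_cases hd : (PySem.Dict.ofList cc).items = []
    · rw [if_pos hd]
      rw [show hitF (some cc) = (fun _ : String => none) by unfold hitF; simp only []; rw [if_pos hd]]
      rw [A2 (fun _ => none) regions PySem.Dict.empty [] 0
        (fun r _ => by rw [PySem.Dict.contains_empty]; rfl)]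
      rw [cfgL_none]
      simp [show (PySem.Dict.empty : PySem.Dict String String).items = [] from rfl]
    · rw [if_neg hd]
      have hH : hitF (some cc) = (fun r =>
          match (PySem.Dict.ofList cc).get? (PySem.Str.lower r) with
          | some v => some v
          | none => (PySem.Dict.ofList cc).get? r) := by
        unfold hitF; simp only []; rw [if_neg hd]
      have hstep : regions.foldl (fun colors region =>
            match (PySem.Dict.ofList cc).get? (PySem.Str.lower region) with
            | some v => colors.insert region v
            | none =>
              match (PySem.Dict.ofList cc).get? region with
              | some v => colors.insert region v
              | none => colors) PySem.Dict.empty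
          = regions.foldl (fun colors r =>
            match hitF (some cc) r with
            | some v => colors.insert r v
            | none => colors) PySem.Dict.empty := by
        apply PySem.List.foldl_congr_mem
        intro acc x _
        rw [hH]
        simp only []
        cases hx : (PySem.Dict.ofList cc).get? (PySem.Str.lower x) with
        | some v => simp only [hx]
        | none => simp only [hx]
      rw [hstep]
      obtain ⟨ih1, ih2⟩ := A1 (hitF (some cc)) regions PySem.Dict.empty []
        PySem.Dict.nodup_keys_empty (fun k => by rw [PySem.Dict.get?_empty]; rfl)
      rw [A2 (hitF (some cc)) regions
        (regions.foldl (fun colors r =>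
            match hitF (some cc) r with
            | some v => colors.insert r v
            | none => colors) PySem.Dict.empty) [] 0
        (fun r hr => by
          rw [PySem.Dict.contains_eq_isSome_get?, ih2 r]
          rw [if_pos (by simp; exact (by simpa using hr : r ∈ regions))]
          simp)]
      rw [ih1]
      simp [show (PySem.Dict.empty : PySem.Dict String String).items = [] from rfl]

lemma B_eq (regions : List String) (config_colors : Option (List (String × String))) :
    get_region_colors_py_alt regions config_colors =
      cfgL (hitF config_colors) regions [] ++ defL (hitF config_colors) regions [] 0 := by
  unfold get_region_colors_py_alt
  simp only []
  have hstep : regions.foldl (fun (st : List (String × String) × List (String × String) × PySem.Set String × Nat) region =>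
      match st with
      | (found, defaults, seen, idx) =>
        if PySem.Set.contains seen region then (found, defaults, seen, idx)
        else
          let seen' := PySem.Set.add seen region
          let color : Option String :=
            match config_colors with
            | none => none
            | some cc =>
              let d := PySem.Dict.ofList cc
              if d.items = [] then none
              else
                match d.get? (PySem.Str.lower region) with
                | some v => some v
                | none => d.get? region
          match color with
          | some v => (found ++ [(region, v)], defaults, seen', idx)
          | none => (found, defaults ++ [(region, DEFAULT_REGION_COLORS.getD (idx % DEFAULT_REGION_COLORS.length) "")], seen', idx + 1))
    ([], [], [], 0)
      = regions.foldl (fun (st : List (String × String) × List (String × String) × PySem.Set String × Nat) r =>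
      match st with
      | (found, defaults, seen, idx) =>
        if PySem.Set.contains seen r then (found, defaults, seen, idx)
        else
          match hitF config_colors r with
          | some v => (found ++ [(r, v)], defaults, PySem.Set.add seen r, idx)
          | none => (found, defaults ++ [(r, DEFAULT_REGION_COLORS.getD (idx % DEFAULT_REGION_COLORS.length) "")], PySem.Set.add seen r, idx + 1))
    ([], [], [], 0) := by
    apply PySem.List.foldl_congr_mem
    intro acc x _
    obtain ⟨f, d, sn, i⟩ := acc
    simp only []
    by_cases hc : PySem.Set.contains sn x
    · simp only [hc, if_true]
    · simp only [hc, if_false, Bool.false_eq_true]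
      cases config_colors with
      | none => rfl
      | some cc =>
        simp only []
        by_cases hd : (PySem.Dict.ofList cc).items = []
        · simp [hitF, hd]
        · cases hx : (PySem.Dict.ofList cc).get? (PySem.Str.lower x) with
          | some v => simp [hitF, hd, hx]
          | none =>
            cases hy : (PySem.Dict.ofList cc).get? x with
            | some v => simp [hitF, hd, hx, hy]
            | none => simp [hitF, hd, hx, hy]
  rw [hstep]
  obtain ⟨h1, h2⟩ := B_fold (hitF config_colors) regions [] [] [] 0
  rw [h1, h2]
  rw [ofList_items_of_nodup]
  · simp
  · simpa using keys_nodup (hitF config_colors) regions [] 0 List.nodup_nil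

-- ===== VERDICT (by name: the statement is the Claim_ definition above) =====
theorem get_region_colors_py_spec : Claim_equal_get_region_colors_py := by
  intro regions config_colors _
  unfold Spec_get_region_colors_py
  rw [A_eq, B_eq]
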